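-- pv_equiv track=rewrite | github.com/eggnee/Algorithm | 프로그래머스/2/42626. 더 맵게/더 맵게.py | solution
-- ===== SOURCE A (Python) =====
-- import heapq
--
-- def solution(scoville, K):
--     answer = 0
--
--     heapq.heapify(scoville)
--
--     while scoville[0] < K :
--         answer += 1
--         first = heapq.heappop(scoville)
--         second = heapq.heappop(scoville)
--         mix = first + (second * 2)
--         heapq.heappush(scoville, mix)
--         if len(scoville) < 2 and scoville[0] < K:
--             return -1
--
--     return answer
-- ===== SOURCE B (Python) =====
-- def solution(scoville, K):
--     orig = sorted(scoville)
--     mixes = []          # FIFO queue of mixes; it stays nondecreasing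
--     i = 0               # head of orig
--     j = 0               # head of mixes
--     answer = 0
--     while True:
--         if i < len(orig) and (j >= len(mixes) or orig[i] <= mixes[j]):
--             cur = orig[i]
--         else:
--             cur = mixes[j]
--         if cur >= K:
--             return answer
--         if (len(orig) - i) + (len(mixes) - j) < 2:
--             return -1
--         if j >= len(mixes) or (i < len(orig) and orig[i] <= mixes[j]):
--             first = orig[i]; i += 1
--         else:
--             first = mixes[j]; j += 1
--         if j >= len(mixes) or (i < len(orig) and orig[i] <= mixes[j]):
--             second = orig[i]; i += 1
--         else:
--             second = mixes[j]; j += 1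
--         mixes.append(first + second * 2)
--         answer += 1
-- ===== Notes on version B (the rewrite author's own statement) =====
-- stated objective: faster
-- what changed: Replaces the binary min-heap (heapify/heappop/heappush) by a two-queue merge: sort once, then keep the sorted originals and a FIFO list of produced mixes (proved to stay nondecreasing) behind two head indices, so every step is two O(1) head pops and one O(1) append instead of O(log n) sift operations.
import Mathlib
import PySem

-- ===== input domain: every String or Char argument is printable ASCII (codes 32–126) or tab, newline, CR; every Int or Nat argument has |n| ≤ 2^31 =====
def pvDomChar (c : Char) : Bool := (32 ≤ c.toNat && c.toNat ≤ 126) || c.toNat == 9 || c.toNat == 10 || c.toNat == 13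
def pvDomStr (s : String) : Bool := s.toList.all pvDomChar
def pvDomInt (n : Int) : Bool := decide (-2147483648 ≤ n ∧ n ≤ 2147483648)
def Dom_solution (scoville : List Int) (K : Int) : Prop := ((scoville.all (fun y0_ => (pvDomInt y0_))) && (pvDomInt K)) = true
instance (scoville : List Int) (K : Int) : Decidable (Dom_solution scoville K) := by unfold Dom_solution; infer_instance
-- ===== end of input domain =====

-- B replaces A's binary min-heap (heapq) by: sort once, then merge the sorted originals with a
-- FIFO queue of produced mixes (which provably stays nondecreasing), so each step is O(1) pops
-- and an O(1) append — no heap and no ordered insertion. A heapifies/pops `scoville` IN PLACE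
-- while B does not mutate it — the equivalence proved here is about the RETURN value only.

-- ===== PORT A =====
-- heapq is not covered by PySem, so CPython's heapq (_siftdown, _siftup, heappush, heappop,
-- heapify) is ported by hand below, step for step from Lib/heapq.py; exact for int elements.
-- Every index these helpers dereference is in range on every call path the program reaches
-- (proved in the lemmas below), so the total `List.getD · · 0` is exact for Python's `heap[i]`.

-- the while-loop of heapq._siftdown(heap, startpos, pos): bubble the hole at `pos` up while the
-- parent is larger; returns the final list and hole position, the caller writes `newitem` there
def pvSdLoop (g : List Int) (newitem : Int) (startpos pos : Nat) : List Int × Nat :=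
  if _h : startpos < pos then
    let parentpos := (pos - 1) / 2
    let parent := g.getD parentpos 0
    if newitem < parent then
      pvSdLoop (g.set pos parent) newitem startpos parentpos
    else (g, pos)
  else (g, pos)
termination_by pos
decreasing_by omega

-- heapq._siftdown
def pySiftdown (g : List Int) (startpos pos : Nat) : List Int :=
  let newitem := g.getD pos 0
  let r := pvSdLoop g newitem startpos pos
  r.1.set r.2 newitem

-- the while-loop of heapq._siftup: move the smaller child into the hole, down to a leaf
-- (CPython picks the right child iff it exists and `not heap[childpos] < heap[rightpos]`)
def pvSuLoop (g : List Int) (endpos pos : Nat) : List Int × Nat :=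
  let childpos := 2*pos + 1
  if _h : childpos < endpos then
    let rightpos := childpos + 1
    if _h2 : rightpos < endpos ∧ ¬ (g.getD childpos 0 < g.getD rightpos 0) then
      pvSuLoop (g.set pos (g.getD rightpos 0)) endpos rightpos
    else
      pvSuLoop (g.set pos (g.getD childpos 0)) endpos childpos
  else (g, pos)
termination_by endpos - pos
decreasing_by · omega
              · omega

-- heapq._siftup: dig the hole down to a leaf, put newitem there, then _siftdown back up
def pySiftup (g : List Int) (pos : Nat) : List Int :=
  let endpos := g.length
  let startpos := pos
  let newitem := g.getD pos 0
  let r := pvSuLoop g endpos pos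
  pySiftdown (r.1.set r.2 newitem) startpos r.2

-- heapq.heappush: append, then _siftdown(heap, 0, len(heap)-1)
def pyHeappush (heap : List Int) (item : Int) : List Int :=
  pySiftdown (heap ++ [item]) 0 heap.length

-- heapq.heappop: pop the last element; if the heap is still nonempty, move it to the root and
-- _siftup(heap, 0).  none = IndexError on an empty heap.
def pyHeappop (heap : List Int) : Option (Int × List Int) :=
  match heap.getLast? with
  | none => none
  | some lastelt =>
    let rest := heap.dropLast
    if rest.isEmpty then some (lastelt, rest)
    else some (rest.getD 0 0, pySiftup (rest.set 0 lastelt) 0)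

-- heapq.heapify: for i in reversed(range(n//2)): _siftup(x, i)
def pyHeapify (x : List Int) : List Int :=
  ((List.range (x.length / 2)).reverse).foldl (fun h i => pySiftup h i) x

-- the `while scoville[0] < K` loop; fuel = initial length bounds the iterations (each one
-- shortens the heap by exactly 1, proved below); the value 0 on the fuel-0 / empty-heap /
-- one-element-heap branches is junk returned exactly where Python raises IndexError
-- (those inputs are excluded by Pre_solution)
def solutionLoop (heap : List Int) (K : Int) (answer : Int) (fuel : Nat) : Int :=
  match fuel with
  | 0 => 0
  | fuel + 1 =>
    match heap with
    | [] => 0                                 -- IndexError: scoville[0] on the empty list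
    | top :: _ =>
      if top < K then
        match pyHeappop heap with
        | none => 0
        | some (first, h1) =>
          match pyHeappop h1 with
          | none => 0                         -- IndexError: heappop of the empty heap
          | some (second, h2) =>
            let mix := first + second * 2
            let h3 := pyHeappush h2 mix
            if h3.length < 2 ∧ h3.getD 0 0 < K then -1
            else solutionLoop h3 K (answer + 1) fuel
      else answer

def solution (scoville : List Int) (K : Int) : Int :=
  let answer : Int := 0
  let h := pyHeapify scoville
  solutionLoop h K answer scoville.length

-- ===== PORT B =====
-- Source B keeps two queues: the suffix of the once-sorted originals (index i) and the FIFO list of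
-- mixes (index j, appended at the back).  A queue-with-head-index is ported as the list suffix
-- from the head onward (exact: the dead prefix is never read again).

-- `cur`: Source B's head-selection if-expression (orig[i] if it exists and is ≤ the mixes head,
-- else mixes[j]); 0 is junk on the both-empty branch, where Source B raises IndexError
def pvCur : List Int → List Int → Int
  | [], [] => 0
  | [], m :: _ => m
  | o :: _, [] => o
  | o :: _, m :: _ => if o ≤ m then o else m

-- Source B's pop block (`if j >= len(mixes) or (i < len(orig) and orig[i] <= mixes[j]) …`):
-- take the smaller head, return it with the two remaining queues; (0, [], []) is junk on the
-- both-empty branch, unreachable behind the size guard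
def pvPopMin : List Int → List Int → Int × List Int × List Int
  | [], [] => (0, [], [])
  | [], m :: ms => (m, [], ms)
  | o :: os, [] => (o, os, [])
  | o :: os, m :: ms => if o ≤ m then (o, os, m :: ms) else (m, o :: os, ms)

-- Source B's `while True` loop; same fuel/junk convention as in port A
def solutionAltLoop (orig mixes : List Int) (K : Int) (ans : Int) (fuel : Nat) : Int :=
  match fuel with
  | 0 => 0
  | fuel + 1 =>
    if orig.isEmpty && mixes.isEmpty then 0   -- IndexError: cur = mixes[j] with both queues empty
    else
      let cur := pvCur orig mixes
      if cur < K then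
        if orig.length + mixes.length < 2 then -1
        else
          let p1 := pvPopMin orig mixes
          let p2 := pvPopMin p1.2.1 p1.2.2
          solutionAltLoop p2.2.1 (p2.2.2 ++ [p1.1 + p2.1 * 2]) K (ans + 1) fuel
      else ans

def solution_alt (scoville : List Int) (K : Int) : Int :=
  solutionAltLoop (PySem.List.sorted scoville (fun x => x)) [] K 0 scoville.length

-- ===== PRECONDITION & SPEC =====
-- A raises IndexError on the empty list (`scoville[0]`) and on a one-element list whose value
-- is below K (second heappop); Pre_ excludes exactly those inputs.
def Pre_solution (scoville : List Int) (K : Int) : Prop :=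
  scoville ≠ [] ∧ (scoville.length = 1 → K ≤ scoville.headD 0)
instance (scoville : List Int) (K : Int) : Decidable (Pre_solution scoville K) := by
  unfold Pre_solution; infer_instance

def pvWitness_solution : List Int × Int := ([1, 2, 3, 9, 10, 12], 7)

def Spec_solution (scoville : List Int) (K : Int) (out : Int) : Prop := out = solution_alt scoville K
instance (scoville : List Int) (K : Int) (out : Int) : Decidable (Spec_solution scoville K out) := by
  unfold Spec_solution; infer_instance

-- ===== CLAIM (what is proved, stated in full; the proofs are below) =====
def Claim_equal_solution : Prop := ∀ (scoville : List Int) (K : Int), Dom_solution scoville K → Pre_solution scoville K → Spec_solution scoville K (solution scoville K)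

-- ===== LEMMAS AND PROOFS =====

-- ---- A-side: the hand-ported heapq is a correct min-heap (length, permutation, heap order) ----

-- index arithmetic of the implicit binary tree: pvDesc s p ↔ p lies in the subtree rooted at s
def pvParentIter : Nat → Nat → Nat
  | 0, p => p
  | k + 1, p => pvParentIter k ((p - 1) / 2)
def pvDesc (s p : Nat) : Prop := ∃ k, pvParentIter k p = s

-- all heap edges whose parent index is ≥ s hold; pvIsHeap = all of them
def pvHeapFrom (g : List Int) (s : Nat) : Prop :=
  ∀ j, 0 < j → j < g.length → s ≤ (j - 1) / 2 → g.getD ((j - 1) / 2) 0 ≤ g.getD j 0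
def pvIsHeap (g : List Int) : Prop := pvHeapFrom g 0

theorem pvGetD_set_self (g : List Int) (p : Nat) (a : Int) (h : p < g.length) :
    (g.set p a).getD p 0 = a := by
  simp [List.getD_eq_getElem?_getD, h]
theorem pvGetD_set_ne (g : List Int) (p i : Nat) (a : Int) (h : i ≠ p) :
    (g.set p a).getD i 0 = g.getD i 0 := by
  simp [List.getD_eq_getElem?_getD, List.getElem?_set_ne (by omega : p ≠ i)]

theorem pvDesc_self (p : Nat) : pvDesc p p := ⟨0, rfl⟩

theorem pvDesc_le {s p : Nat} (h : pvDesc s p) : s ≤ p := by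
  obtain ⟨k, hk⟩ := h
  have H : ∀ k p, pvParentIter k p = s → s ≤ p := by
    intro k
    induction k with
    | zero => intro p hp; simp [pvParentIter] at hp; omega
    | succ k ih => intro p hp; have := ih _ hp; omega
  exact H k p hk

theorem pvDesc_parent {s p : Nat} (h : pvDesc s p) (hne : p ≠ s) : pvDesc s ((p - 1) / 2) := by
  obtain ⟨k, hk⟩ := h
  cases k with
  | zero => simp [pvParentIter] at hk; omega
  | succ k => exact ⟨k, hk⟩

theorem pvDesc_child {s p j : Nat} (h : pvDesc s p) (hj : (j - 1) / 2 = p) : pvDesc s j := by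
  obtain ⟨k, hk⟩ := h
  exact ⟨k + 1, by simpa [pvParentIter, hj] using hk⟩

theorem pvDesc_zero (p : Nat) : pvDesc 0 p := by
  induction p using Nat.strong_induction_on with
  | _ p ih =>
    rcases Nat.eq_zero_or_pos p with h | h
    · exact ⟨0, by simp [h, pvParentIter]⟩
    · exact pvDesc_child (ih ((p-1)/2) (by omega)) rfl

theorem pvConsMidSwap (t d : List Int) (x y : Int) : (y :: (t ++ x :: d)).Perm (x :: (t ++ y :: d)) :=
  ((List.perm_middle).cons y).trans ((List.Perm.swap x y _).trans (((List.perm_middle).symm).cons x))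

theorem pvTakeDrop (l : List Int) (n : Nat) (h : n < l.length) :
    l = l.take n ++ l[n] :: l.drop (n+1) := by
  conv_lhs => rw [← List.take_append_drop n l]
  rw [List.drop_eq_getElem_cons h]

theorem pvSwapPerm (g : List Int) (p q : Nat) (x : Int) (hp : p < g.length) (hq : q < g.length)
    (hne : p ≠ q) : ((g.set p (g.getD q 0)).set q x).Perm (g.set p x) := by
  induction g generalizing p q with
  | nil => simp at hp
  | cons a g ih =>
    cases p with
    | zero =>
      cases q with
      | zero => omega
      | succ q =>
        simp only [List.set_cons_zero, List.set_cons_succ, List.getD_cons_succ]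
        have hq' : q < g.length := by simpa using hq
        rw [List.getD_eq_getElem g 0 hq', List.set_eq_take_cons_drop x hq']
        conv_rhs => rw [pvTakeDrop g q hq']
        exact pvConsMidSwap _ _ x (g[q])
    | succ p =>
      cases q with
      | zero =>
        simp only [List.set_cons_zero, List.set_cons_succ, List.getD_cons_zero]
        have hp' : p < g.length := by simpa using hp
        rw [List.set_eq_take_cons_drop a hp', List.set_eq_take_cons_drop x hp']
        exact pvConsMidSwap _ _ a x
      | succ q =>
        simp only [List.set_cons_succ, List.getD_cons_succ]
        exact List.Perm.cons a (ih p q (by simpa using hp) (by simpa using hq) (by omega))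

theorem pvSdLoop_spec (v : Int) (s : Nat) : ∀ (p : Nat) (g : List Int),
    p < g.length → pvDesc s p →
    (∀ j, 0 < j → j < g.length → s ≤ (j - 1) / 2 → j ≠ p → (j - 1) / 2 ≠ p →
      g.getD ((j - 1) / 2) 0 ≤ g.getD j 0) →
    (∀ j, j < g.length → (j - 1) / 2 = p → j ≠ p → v ≤ g.getD j 0) →
    (∀ j, j < g.length → (j - 1) / 2 = p → j ≠ p → s < p →
      g.getD ((p - 1) / 2) 0 ≤ g.getD j 0) →
    (pvSdLoop g v s p).1.length = g.length ∧ (pvSdLoop g v s p).2 < g.length ∧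
    ((pvSdLoop g v s p).1.set (pvSdLoop g v s p).2 v).Perm (g.set p v) ∧
    pvHeapFrom ((pvSdLoop g v s p).1.set (pvSdLoop g v s p).2 v) s := by
  intro p
  induction p using Nat.strong_induction_on with
  | _ p IH =>
  intro g hp hdesc hedges hchild hgrand
  rw [pvSdLoop]
  by_cases hsp : s < p
  · simp only [dif_pos hsp]
    by_cases hlt : v < g.getD ((p - 1) / 2) 0
    · simp only [if_pos hlt]
      have hss : s ≤ p := pvDesc_le hdesc
      have hplen : (g.set p (g.getD ((p - 1) / 2) 0)).length = g.length := by simp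
      obtain ⟨L, P2, PERM, HEAP⟩ := IH ((p - 1) / 2) (by omega) (g.set p (g.getD ((p - 1) / 2) 0))
        (by rw [hplen]; omega)
        (pvDesc_parent hdesc (by omega))
        (by -- hedges'
          intro j h0 hj hs hj1 hj2
          rw [hplen] at hj
          by_cases hjp : j = p
          · exact absurd (by omega : (j - 1) / 2 = (p - 1) / 2) (by omega)
          · by_cases hpj : (j - 1) / 2 = p
            · rw [hpj, pvGetD_set_self _ _ _ hp, pvGetD_set_ne _ _ _ _ hjp]
              exact hgrand j hj hpj hjp hsp
            · rw [pvGetD_set_ne _ _ _ _ hpj, pvGetD_set_ne _ _ _ _ hjp]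
              exact hedges j h0 hj hs hjp hpj)
        (by -- hchild'
          intro j hj hpj hjne
          rw [hplen] at hj
          by_cases hjp : j = p
          · rw [hjp, pvGetD_set_self _ _ _ hp]; omega
          · rw [pvGetD_set_ne _ _ _ _ hjp]
            have hs2 : s ≤ (j - 1) / 2 := by
              have := pvDesc_le (pvDesc_parent hdesc (by omega))
              omega
            have := hedges j (by omega) hj hs2 hjp (by omega)
            rw [hpj] at this
            omega)
        (by -- hgrand'
          intro j hj hpj hjne hspp
          rw [hplen] at hj
          have hedgepp : g.getD (((p - 1) / 2 - 1) / 2) 0 ≤ g.getD ((p - 1) / 2) 0 := by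
            refine hedges ((p - 1) / 2) (by omega) (by omega) ?_ (by omega) (by omega)
            have := pvDesc_le (pvDesc_parent (pvDesc_parent hdesc (by omega)) (by omega))
            omega
          rw [pvGetD_set_ne _ _ _ _ (by omega : ((p - 1) / 2 - 1) / 2 ≠ p)]
          by_cases hjp : j = p
          · rw [hjp, pvGetD_set_self _ _ _ hp]
            exact hedgepp
          · rw [pvGetD_set_ne _ _ _ _ hjp]
            have := hedges j (by omega) hj (by omega) hjp (by omega)
            rw [hpj] at this
            omega)
      refine ⟨by rw [← hplen]; exact L, by rw [hplen] at P2; exact P2, ?_, HEAP⟩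
      exact PERM.trans (pvSwapPerm g p ((p - 1) / 2) v hp (by omega) (by omega))
    · simp only [if_neg hlt]
      refine ⟨by simp, hp, by exact List.Perm.refl _, ?_⟩
      intro j h0 hj hs
      simp only [List.length_set] at hj
      by_cases hjp : j = p
      · subst hjp
        rw [pvGetD_set_ne _ _ _ _ (by omega), pvGetD_set_self _ _ _ hp]
        omega
      · by_cases hpj : (j - 1) / 2 = p
        · rw [hpj, pvGetD_set_self _ _ _ hp, pvGetD_set_ne _ _ _ _ hjp]
          exact hchild j hj hpj hjp
        · rw [pvGetD_set_ne _ _ _ _ hpj, pvGetD_set_ne _ _ _ _ hjp]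
          exact hedges j h0 hj hs hjp hpj
  · simp only [dif_neg hsp]
    have hps : p = s := by have := pvDesc_le hdesc; omega
    refine ⟨by simp, hp, by exact List.Perm.refl _, ?_⟩
    intro j h0 hj hs
    simp only [List.length_set] at hj
    by_cases hjp : j = p
    · omega
    · by_cases hpj : (j - 1) / 2 = p
      · rw [hpj, pvGetD_set_self _ _ _ hp, pvGetD_set_ne _ _ _ _ hjp]
        exact hchild j hj hpj hjp
      · rw [pvGetD_set_ne _ _ _ _ hpj, pvGetD_set_ne _ _ _ _ hjp]
        exact hedges j h0 hj hs hjp hpj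

theorem pvSuLoop_spec (s : Nat) : ∀ (k : Nat) (g : List Int) (p : Nat), g.length - p ≤ k →
    p < g.length → pvDesc s p →
    (∀ j, 0 < j → j < g.length → s ≤ (j - 1) / 2 → j ≠ p → (j - 1) / 2 ≠ p →
      g.getD ((j - 1) / 2) 0 ≤ g.getD j 0) →
    (∀ j, j < g.length → (j - 1) / 2 = p → j ≠ p → s < p →
      g.getD ((p - 1) / 2) 0 ≤ g.getD j 0) →
    (pvSuLoop g g.length p).1.length = g.length ∧ (pvSuLoop g g.length p).2 < g.length ∧
    pvDesc s (pvSuLoop g g.length p).2 ∧ g.length ≤ 2 * (pvSuLoop g g.length p).2 + 1 ∧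
    (∀ x, ((pvSuLoop g g.length p).1.set (pvSuLoop g g.length p).2 x).Perm (g.set p x)) ∧
    (∀ j, 0 < j → j < g.length → s ≤ (j - 1) / 2 → j ≠ (pvSuLoop g g.length p).2 →
      (j - 1) / 2 ≠ (pvSuLoop g g.length p).2 →
      (pvSuLoop g g.length p).1.getD ((j - 1) / 2) 0 ≤ (pvSuLoop g g.length p).1.getD j 0) := by
  intro k
  induction k with
  | zero => intro g p hk hp; omega
  | succ k IH =>
    intro g p hk hp hdesc hedges hgrand
    rw [pvSuLoop]
    by_cases hc : 2 * p + 1 < g.length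
    · simp only [dif_pos hc]
      by_cases h2 : 2 * p + 1 + 1 < g.length ∧ ¬ (g.getD (2 * p + 1) 0 < g.getD (2 * p + 1 + 1) 0)
      · simp only [dif_pos h2]
        have hclen : (g.set p (g.getD (2 * p + 1 + 1) 0)).length = g.length := by simp
        have hE : ∀ j, 0 < j → j < (g.set p (g.getD (2 * p + 1 + 1) 0)).length → s ≤ (j - 1) / 2 →
            j ≠ 2 * p + 2 → (j - 1) / 2 ≠ 2 * p + 2 →
            (g.set p (g.getD (2 * p + 1 + 1) 0)).getD ((j - 1) / 2) 0 ≤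
              (g.set p (g.getD (2 * p + 1 + 1) 0)).getD j 0 := by
          intro j h0 hj hs hj1 hj2
          rw [hclen] at hj
          by_cases hjp : j = p
          · rw [hjp, pvGetD_set_ne _ _ _ _ (by omega : (p - 1) / 2 ≠ p), pvGetD_set_self _ _ _ hp]
            exact hgrand (2 * p + 2) (by omega) (by omega) (by omega) (by omega)
          · by_cases hpj : (j - 1) / 2 = p
            · rw [hpj, pvGetD_set_self _ _ _ hp, pvGetD_set_ne _ _ _ _ hjp]
              have hj21 : j = 2 * p + 1 := by omega
              subst hj21
              omega
            · rw [pvGetD_set_ne _ _ _ _ hpj, pvGetD_set_ne _ _ _ _ hjp]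
              exact hedges j h0 hj hs hjp hpj
        have hG : ∀ j, j < (g.set p (g.getD (2 * p + 1 + 1) 0)).length → (j - 1) / 2 = 2 * p + 2 →
            j ≠ 2 * p + 2 → s < 2 * p + 2 →
            (g.set p (g.getD (2 * p + 1 + 1) 0)).getD ((2 * p + 2 - 1) / 2) 0 ≤
              (g.set p (g.getD (2 * p + 1 + 1) 0)).getD j 0 := by
          intro j hj hpj hjne hsc
          rw [hclen] at hj
          have hcp : (2 * p + 2 - 1) / 2 = p := by omega
          rw [hcp, pvGetD_set_self _ _ _ hp, pvGetD_set_ne _ _ _ _ (by omega : j ≠ p)]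
          have := hedges j (by omega) hj (by omega) (by omega) (by omega)
          rw [hpj] at this
          omega
        have hgoal := IH (g.set p (g.getD (2 * p + 1 + 1) 0)) (2 * p + 2)
          (by rw [hclen]; omega) (by rw [hclen]; omega)
          (pvDesc_child hdesc (by omega)) hE hG
        rw [hclen] at hgoal
        obtain ⟨L, P2, D2, LEAF, PERM, HEDGE⟩ := hgoal
        exact ⟨L, by omega, D2, by omega, fun x =>
          (PERM x).trans (pvSwapPerm g p (2 * p + 1 + 1) x hp (by omega) (by omega)), HEDGE⟩
      · simp only [dif_neg h2]
        have hclen : (g.set p (g.getD (2 * p + 1) 0)).length = g.length := by simp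
        have hE : ∀ j, 0 < j → j < (g.set p (g.getD (2 * p + 1) 0)).length → s ≤ (j - 1) / 2 →
            j ≠ 2 * p + 1 → (j - 1) / 2 ≠ 2 * p + 1 →
            (g.set p (g.getD (2 * p + 1) 0)).getD ((j - 1) / 2) 0 ≤
              (g.set p (g.getD (2 * p + 1) 0)).getD j 0 := by
          intro j h0 hj hs hj1 hj2
          rw [hclen] at hj
          by_cases hjp : j = p
          · rw [hjp, pvGetD_set_ne _ _ _ _ (by omega : (p - 1) / 2 ≠ p), pvGetD_set_self _ _ _ hp]
            exact hgrand (2 * p + 1) (by omega) (by omega) (by omega) (by omega)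
          · by_cases hpj : (j - 1) / 2 = p
            · rw [hpj, pvGetD_set_self _ _ _ hp, pvGetD_set_ne _ _ _ _ hjp]
              have hj22 : j = 2 * p + 2 := by omega
              subst hj22
              rcases not_and_or.mp h2 with hc2 | hc2
              · omega
              · have hc3 : g.getD (2 * p + 1) 0 < g.getD (2 * p + 1 + 1) 0 := by
                  by_contra hc4
                  exact hc2 hc4
                have h22 : 2 * p + 1 + 1 = 2 * p + 2 := by omega
                rw [h22] at hc3
                omega
            · rw [pvGetD_set_ne _ _ _ _ hpj, pvGetD_set_ne _ _ _ _ hjp]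
              exact hedges j h0 hj hs hjp hpj
        have hG : ∀ j, j < (g.set p (g.getD (2 * p + 1) 0)).length → (j - 1) / 2 = 2 * p + 1 →
            j ≠ 2 * p + 1 → s < 2 * p + 1 →
            (g.set p (g.getD (2 * p + 1) 0)).getD ((2 * p + 1 - 1) / 2) 0 ≤
              (g.set p (g.getD (2 * p + 1) 0)).getD j 0 := by
          intro j hj hpj hjne hsc
          rw [hclen] at hj
          have hcp : (2 * p + 1 - 1) / 2 = p := by omega
          rw [hcp, pvGetD_set_self _ _ _ hp, pvGetD_set_ne _ _ _ _ (by omega : j ≠ p)]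
          have := hedges j (by omega) hj (by omega) (by omega) (by omega)
          rw [hpj] at this
          omega
        have hgoal := IH (g.set p (g.getD (2 * p + 1) 0)) (2 * p + 1)
          (by rw [hclen]; omega) (by rw [hclen]; omega)
          (pvDesc_child hdesc (by omega)) hE hG
        rw [hclen] at hgoal
        obtain ⟨L, P2, D2, LEAF, PERM, HEDGE⟩ := hgoal
        exact ⟨L, by omega, D2, by omega, fun x =>
          (PERM x).trans (pvSwapPerm g p (2 * p + 1) x hp (by omega) (by omega)), HEDGE⟩
    · simp only [dif_neg hc]
      exact ⟨by simp, hp, hdesc, by omega, fun x => List.Perm.refl _, fun j h0 hj hs hj1 hj2 =>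
        hedges j h0 hj hs hj1 hj2⟩

theorem pvSet_getD_self (g : List Int) (s : Nat) (h : s < g.length) :
    g.set s (g.getD s 0) = g := by
  rw [List.getD_eq_getElem g 0 h]
  exact List.set_getElem_self h

-- siftup with startpos s: restores all edges with parent ≥ s, permutes, keeps length
theorem pySiftup_spec (g : List Int) (s : Nat) (hs : s < g.length)
    (hedges1 : ∀ j, 0 < j → j < g.length → s ≤ (j - 1) / 2 → (j - 1) / 2 ≠ s →
      g.getD ((j - 1) / 2) 0 ≤ g.getD j 0) :
    (pySiftup g s).length = g.length ∧ (pySiftup g s).Perm g ∧ pvHeapFrom (pySiftup g s) s := by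
  obtain ⟨L1, P1, D1, LEAF, PERM1, HEDGE1⟩ := pvSuLoop_spec s g.length g s (by omega) hs
    (pvDesc_self s)
    (by intro j h0 hj hsj hj1 hj2; exact hedges1 j h0 hj hsj hj2)
    (by intro j hj hpj hjne hss; omega)
  set r := pvSuLoop g g.length s with hr
  have hv : (r.1.set r.2 (g.getD s 0)).getD r.2 0 = g.getD s 0 := by
    rw [pvGetD_set_self]; omega
  have hlen2 : (r.1.set r.2 (g.getD s 0)).length = g.length := by simp [L1]
  obtain ⟨L2, P2, PERM2, HEAP2⟩ := pvSdLoop_spec (g.getD s 0) s r.2 (r.1.set r.2 (g.getD s 0))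
    (by omega) D1
    (by -- edges of r.1.set r.2 v except around r.2
      intro j h0 hj hsj hj1 hj2
      rw [hlen2] at hj
      rw [pvGetD_set_ne _ _ _ _ hj1, pvGetD_set_ne _ _ _ _ hj2]
      exact HEDGE1 j h0 hj hsj hj1 hj2)
    (by -- children of the leaf r.2: none
      intro j hj hpj hjne
      rw [hlen2] at hj
      omega)
    (by intro j hj hpj hjne hsr
        rw [hlen2] at hj
        omega)
  -- assemble: pySiftup g s = (pvSdLoop ... ).1.set (pvSdLoop ...).2 v
  have hrw : pySiftup g s =
      (pvSdLoop (r.1.set r.2 (g.getD s 0)) (g.getD s 0) s r.2).1.set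
        (pvSdLoop (r.1.set r.2 (g.getD s 0)) (g.getD s 0) s r.2).2 (g.getD s 0) := by
    simp only [pySiftup, pySiftdown, ← hr, hv]
  rw [hrw]
  refine ⟨by rw [List.length_set]; exact L2.trans hlen2, ?_, HEAP2⟩
  exact PERM2.trans (by
    rw [List.set_set]
    exact (PERM1 _).trans (by rw [pvSet_getD_self g s hs]))

theorem pyHeapify_spec (x : List Int) :
    (pyHeapify x).length = x.length ∧ (pyHeapify x).Perm x ∧ pvIsHeap (pyHeapify x) := by
  have MAIN : ∀ i, i ≤ x.length / 2 →
      ∀ g, g.length = x.length → g.Perm x →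
      (∀ j, 0 < j → j < g.length → i ≤ (j - 1) / 2 → g.getD ((j - 1) / 2) 0 ≤ g.getD j 0) →
      (((List.range i).reverse).foldl (fun h i => pySiftup h i) g).length = x.length ∧
      (((List.range i).reverse).foldl (fun h i => pySiftup h i) g).Perm x ∧
      pvHeapFrom (((List.range i).reverse).foldl (fun h i => pySiftup h i) g) 0 := by
    intro i
    induction i with
    | zero =>
      intro _ g hl hperm hinv
      simpa using ⟨hl, hperm, fun j h0 hj hs => hinv j h0 hj (by omega)⟩
    | succ i IH =>
      intro hle g hl hperm hinv
      rw [List.range_succ, List.reverse_append, List.reverse_singleton]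
      simp only [List.singleton_append, List.foldl_cons]
      have hi : i < g.length := by omega
      obtain ⟨L, P, H⟩ := pySiftup_spec g i hi
        (fun j h0 hj hs hne => hinv j h0 hj (by omega))
      exact IH (by omega) (pySiftup g i) (by omega) (P.trans hperm)
        (fun j h0 hj hs => H j h0 hj hs)
  obtain ⟨L, P, H⟩ := MAIN (x.length / 2) (by omega) x rfl (List.Perm.refl x)
    (by intro j h0 hj hs; omega)
  exact ⟨L, P, H⟩

theorem pyHeappush_spec (h : List Int) (v : Int) (hh : pvIsHeap h) :
    (pyHeappush h v).length = h.length + 1 ∧ (pyHeappush h v).Perm (v :: h) ∧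
    pvIsHeap (pyHeappush h v) := by
  have hlen : (h ++ [v]).length = h.length + 1 := by simp
  have hget : (h ++ [v]).getD h.length 0 = v := by
    rw [List.getD_eq_getElem _ 0 (by simp)]
    simp
  obtain ⟨L, P2, PERM, HEAP⟩ := pvSdLoop_spec v 0 h.length (h ++ [v])
    (by simp) (pvDesc_zero _)
    (by intro j h0 hj hj1 hj2 hj3
        rw [hlen] at hj
        have hjlt : j < h.length := by omega
        have hplt : (j - 1) / 2 < h.length := by omega
        rw [List.getD_eq_getElem _ 0 (by rw [hlen]; omega),
            List.getD_eq_getElem _ 0 (by rw [hlen]; omega)]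
        simp only [List.getElem_append_left hplt, List.getElem_append_left hjlt]
        have := hh j h0 hjlt (by omega)
        rwa [List.getD_eq_getElem _ 0 (by omega), List.getD_eq_getElem _ 0 (by omega)] at this
    )
    (by intro j hj hpj hjne
        rw [hlen] at hj
        omega)
    (by intro j hj hpj hjne _
        rw [hlen] at hj
        omega)
  have hrw : pyHeappush h v =
      (pvSdLoop (h ++ [v]) v 0 h.length).1.set (pvSdLoop (h ++ [v]) v 0 h.length).2 v := by
    simp only [pyHeappush, pySiftdown, hget]
  rw [hrw]
  refine ⟨by rw [List.length_set]; rw [L, hlen], ?_, HEAP⟩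
  refine PERM.trans ?_
  have hset : (h ++ [v]).set h.length v = h ++ [v] := by
    have := pvSet_getD_self (h ++ [v]) h.length (by simp)
    rwa [hget] at this
  rw [hset]
  exact List.perm_append_singleton v h

theorem pvHeap_min (g : List Int) (hg : pvIsHeap g) :
    ∀ j, j < g.length → g.getD 0 0 ≤ g.getD j 0 := by
  intro j
  induction j using Nat.strong_induction_on with
  | _ j IH =>
    intro hj
    rcases Nat.eq_zero_or_pos j with h0 | h0
    · subst h0; exact le_refl _
    · exact le_trans (IH ((j - 1) / 2) (by omega) (by omega)) (hg j h0 hj (by omega))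

theorem pvGetD_dropLast (g : List Int) (j : Nat) (hj : j < g.length - 1) :
    g.dropLast.getD j 0 = g.getD j 0 := by
  rw [List.getD_eq_getElem _ 0 (by simp; omega), List.getD_eq_getElem _ 0 (by omega)]
  rw [List.getElem_dropLast]

theorem pyHeappop_spec (g : List Int) (hg : pvIsHeap g) (hne : g ≠ []) :
    ∃ g', pyHeappop g = some (g.getD 0 0, g') ∧ pvIsHeap g' ∧
      (g.getD 0 0 :: g').Perm g ∧ g'.length + 1 = g.length := by
  have hlast : g.getLast? = some (g.getLast hne) := List.getLast?_eq_some_getLast hne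
  rcases Nat.lt_or_ge g.length 2 with hsmall | hbig
  · -- singleton
    have h1 : g.length = 1 := by
      cases g with
      | nil => exact absurd rfl hne
      | cons a t => simp at hsmall ⊢; omega
    obtain ⟨a, ha⟩ : ∃ a, g = [a] := by
      cases g with
      | nil => exact absurd rfl hne
      | cons a t =>
        cases t with
        | nil => exact ⟨a, rfl⟩
        | cons b t => simp at h1
    subst ha
    refine ⟨[], ?_, ?_, ?_, ?_⟩
    · simp [pyHeappop]
    · intro j h0 hj hs; simp at hj
    · simp
    · simp
  · -- length ≥ 2
    set rest := g.dropLast with hrest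
    have hrlen : rest.length = g.length - 1 := by simp [hrest]
    have hrne : ¬ rest.isEmpty := by
      rw [List.isEmpty_iff_length_eq_zero]
      omega
    have hstep : pyHeappop g = some (rest.getD 0 0, pySiftup (rest.set 0 (g.getLast hne)) 0) := by
      simp only [pyHeappop, hlast, hrest]
      rw [if_neg (by rw [← hrest]; exact hrne)]
    have hget0 : rest.getD 0 0 = g.getD 0 0 := pvGetD_dropLast g 0 (by omega)
    have hslen : (rest.set 0 (g.getLast hne)).length = g.length - 1 := by simp [hrlen]
    obtain ⟨L, P, H⟩ := pySiftup_spec (rest.set 0 (g.getLast hne)) 0 (by omega)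
      (by intro j h0 hj hs hne2
          rw [hslen] at hj
          rw [pvGetD_set_ne _ _ _ _ hne2, pvGetD_set_ne _ _ _ _ (by omega)]
          rw [pvGetD_dropLast g _ (by omega), pvGetD_dropLast g _ (by omega)]
          exact hg j h0 (by omega) hs)
    refine ⟨pySiftup (rest.set 0 (g.getLast hne)) 0, by rw [hstep, hget0], H, ?_, by omega⟩
    -- permutation: g[0] :: result ~ g
    have hPerm1 : (pySiftup (rest.set 0 (g.getLast hne)) 0).Perm (rest.set 0 (g.getLast hne)) := P
    have hrest0 : ∃ t, rest = g.getD 0 0 :: t := by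
      cases hr : rest with
      | nil => rw [hr] at hrlen; simp at hrlen; omega
      | cons a t =>
        refine ⟨t, by rw [← hget0, hr]; simp⟩
    obtain ⟨t, ht⟩ := hrest0
    have hsplit : g = rest ++ [g.getLast hne] := (List.dropLast_append_getLast hne).symm
    refine (hPerm1.cons (g.getD 0 0)).trans ?_
    have hset : rest.set 0 (g.getLast hne) = g.getLast hne :: t := by rw [ht]; simp
    rw [hset]
    conv_rhs => rw [hsplit, ht]
    exact List.Perm.cons _ (List.perm_append_singleton _ _).symm

theorem pvHead_eq (h s : List Int) (hh : pvIsHeap h) (hs : s.Pairwise (· ≤ ·)) (hp : h.Perm s)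
    (hne : h ≠ []) : h.getD 0 0 = s.getD 0 0 := by
  have hsne : s ≠ [] := by
    intro hcon
    rw [hcon] at hp
    exact hne (List.Perm.eq_nil hp)
  obtain ⟨a, h', rfl⟩ : ∃ a h', h = a :: h' := by
    cases h with
    | nil => exact absurd rfl hne
    | cons a h' => exact ⟨a, h', rfl⟩
  obtain ⟨m, t, rfl⟩ : ∃ m t, s = m :: t := by
    cases s with
    | nil => exact absurd rfl hsne
    | cons m t => exact ⟨m, t, rfl⟩
  simp only [List.getD_cons_zero]
  have hma : m ≤ a := by
    have hmem : a ∈ m :: t := hp.mem_iff.mp List.mem_cons_self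
    rcases List.mem_cons.mp hmem with rfl | hmem
    · exact le_refl _
    · exact (List.pairwise_cons.mp hs).1 a hmem
  have ham : a ≤ m := by
    have hmem : m ∈ a :: h' := hp.mem_iff.mpr List.mem_cons_self
    obtain ⟨i, hi, hgi⟩ := List.getElem_of_mem hmem
    have := pvHeap_min (a :: h') hh i hi
    rw [List.getD_eq_getElem _ 0 hi, hgi, List.getD_cons_zero] at this
    exact this
  omega

-- ---- B-side: the two-queue merge view ----

-- the sorted multiset the two queues represent (proof device; the ports never compute it)
def pvMerge : List Int → List Int → List Int
  | [], ms => ms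
  | o :: os, [] => o :: os
  | o :: os, m :: ms => if o ≤ m then o :: pvMerge os (m :: ms) else m :: pvMerge (o :: os) ms
termination_by os ms => os.length + ms.length

theorem pvMerge_nil_right (os : List Int) : pvMerge os [] = os := by
  cases os <;> simp [pvMerge]

theorem pvMerge_perm : ∀ (os ms : List Int), (pvMerge os ms).Perm (os ++ ms)
  | [], ms => by simp [pvMerge]
  | o :: os, [] => by simp [pvMerge]
  | o :: os, m :: ms => by
    rw [pvMerge]
    split
    · exact ((pvMerge_perm os (m :: ms)).cons o)
    · refine ((pvMerge_perm (o :: os) ms).cons m).trans ?_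
      exact (List.perm_middle (a := m) (l₁ := o :: os) (l₂ := ms)).symm
termination_by os ms => os.length + ms.length

theorem pvMerge_sorted : ∀ (os ms : List Int), os.Pairwise (· ≤ ·) → ms.Pairwise (· ≤ ·) →
    (pvMerge os ms).Pairwise (· ≤ ·)
  | [], ms => fun _ h => by simpa [pvMerge] using h
  | o :: os, [] => fun h _ => by simpa [pvMerge] using h
  | o :: os, m :: ms => fun ho hm => by
    rw [pvMerge]
    split
    · rename_i hom
      refine List.pairwise_cons.mpr ⟨?_, pvMerge_sorted os (m :: ms) (List.pairwise_cons.mp ho).2 hm⟩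
      intro x hx
      have hx2 : x ∈ os ++ (m :: ms) := (pvMerge_perm os (m :: ms)).mem_iff.mp hx
      rcases List.mem_append.mp hx2 with h | h
      · exact (List.pairwise_cons.mp ho).1 x h
      · rcases List.mem_cons.mp h with rfl | h
        · exact hom
        · exact le_trans hom ((List.pairwise_cons.mp hm).1 x h)
    · rename_i hom
      refine List.pairwise_cons.mpr ⟨?_, pvMerge_sorted (o :: os) ms ho (List.pairwise_cons.mp hm).2⟩
      intro x hx
      have hx2 : x ∈ (o :: os) ++ ms := (pvMerge_perm (o :: os) ms).mem_iff.mp hx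
      rcases List.mem_append.mp hx2 with h | h
      · rcases List.mem_cons.mp h with rfl | h
        · omega
        · have := (List.pairwise_cons.mp ho).1 x h
          omega
      · exact (List.pairwise_cons.mp hm).1 x h
termination_by os ms => os.length + ms.length

-- popping the smaller head takes exactly the head of the merged view off
theorem pvPopMin_merge : ∀ (os ms : List Int), os ≠ [] ∨ ms ≠ [] →
    pvMerge os ms = (pvPopMin os ms).1 :: pvMerge (pvPopMin os ms).2.1 (pvPopMin os ms).2.2 := by
  intro os ms h
  match os, ms with
  | [], [] => simp at h
  | [], m :: ms => simp [pvPopMin, pvMerge]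
  | o :: os, [] => simp [pvPopMin, pvMerge_nil_right]
  | o :: os, m :: ms =>
    by_cases hom : o ≤ m <;> simp [pvPopMin, pvMerge, hom]

-- which queue a pop took from, and what remains
theorem pvPopMin_cases (os ms : List Int) (h : os ≠ [] ∨ ms ≠ []) :
    ((pvPopMin os ms).1 ∈ os ∧ (pvPopMin os ms).2.1 = os.tail ∧ (pvPopMin os ms).2.2 = ms) ∨
    (ms ≠ [] ∧ (pvPopMin os ms).1 = ms.headD 0 ∧ (pvPopMin os ms).2.1 = os ∧
      (pvPopMin os ms).2.2 = ms.tail) := by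
  match os, ms with
  | [], [] => simp at h
  | [], m :: ms => right; simp [pvPopMin]
  | o :: os, [] => left; simp [pvPopMin]
  | o :: os, m :: ms =>
    by_cases hom : o ≤ m
    · left; simp [pvPopMin, hom]
    · right; simp [pvPopMin, hom]

theorem pvPairwise_tail {l : List Int} (h : l.Pairwise (· ≤ ·)) : l.tail.Pairwise (· ≤ ·) := by
  cases l with
  | nil => simp
  | cons a t => exact (List.pairwise_cons.mp h).2

theorem pvCur_popMin (os ms : List Int) (h : os ≠ [] ∨ ms ≠ []) :
    pvCur os ms = (pvPopMin os ms).1 := by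
  match os, ms with
  | [], [] => simp at h
  | [], m :: ms => simp [pvCur, pvPopMin]
  | o :: os, [] => simp [pvCur, pvPopMin]
  | o :: os, m :: ms => by_cases hom : o ≤ m <;> simp [pvCur, pvPopMin, hom]

-- in a sorted list every element is ≤ the last one
theorem pvLe_getLastD {l : List Int} (h : l.Pairwise (· ≤ ·)) :
    ∀ m ∈ l, m ≤ l.getLastD 0 := by
  induction l with
  | nil => simp
  | cons a t ih =>
    intro m hm
    cases t with
    | nil => simp at hm ⊢; omega
    | cons b t2 =>
      rcases List.mem_cons.mp hm with rfl | hm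
      · have hb : b ∈ b :: t2 := List.mem_cons_self
        have h1 : m ≤ b := (List.pairwise_cons.mp h).1 b hb
        have h2 := ih (List.pairwise_cons.mp h).2 b hb
        simpa using le_trans h1 h2
      · simpa using ih (List.pairwise_cons.mp h).2 m hm

theorem pvGetLastD_tail (l : List Int) (h : l.tail ≠ []) : l.tail.getLastD 0 = l.getLastD 0 := by
  cases l with
  | nil => simp at h
  | cons a t =>
    cases t with
    | nil => simp at h
    | cons b t2 => simp

theorem pvHeadD_mem_dropLast (l : List Int) (h : l.tail ≠ []) : l.headD 0 ∈ l.dropLast := by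
  cases l with
  | nil => simp at h
  | cons a t =>
    cases t with
    | nil => simp at h
    | cons b t2 => simp

theorem pvMem_dropLast_tail (l : List Int) {m : Int} (h : m ∈ l.tail.dropLast) :
    m ∈ l.dropLast := by
  cases l with
  | nil => simp at h
  | cons a t =>
    cases t with
    | nil => simp at h
    | cons b t2 =>
      simp only [List.tail_cons] at h
      simp [List.dropLast_cons₂]
      right
      simpa using h

theorem pvGetLastD_concat (l : List Int) (a : Int) : (l ++ [a]).getLastD 0 = a := by
  simp [List.getLastD_eq_getLast?]

-- the queue invariant: the last produced mix came from a pair (f', s') with every still-live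
-- element other than that mix itself ≥ s' =: b, and mix ≤ 3 b
def pvInv (orig mixes : List Int) : Prop :=
  mixes = [] ∨ ∃ b, (∀ x ∈ orig, b ≤ x) ∧ (∀ m ∈ mixes.dropLast, b ≤ m) ∧
    mixes.getLastD 0 ≤ 3 * b

-- one B step: pop the two global minima, append their mix; the merged view loses its two heads
-- and the queue sortedness + invariant are preserved
theorem pvStep (orig mixes o1 m1 o2 m2 : List Int) (f s : Int)
    (hp1 : pvPopMin orig mixes = (f, o1, m1))
    (hp2 : pvPopMin o1 m1 = (s, o2, m2))
    (hso : orig.Pairwise (· ≤ ·)) (hsm : mixes.Pairwise (· ≤ ·))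
    (hinv : pvInv orig mixes)
    (hlen : 2 ≤ orig.length + mixes.length) :
    pvMerge orig mixes = f :: s :: pvMerge o2 m2 ∧
    o2.Pairwise (· ≤ ·) ∧ (m2 ++ [f + s * 2]).Pairwise (· ≤ ·) ∧
    pvInv o2 (m2 ++ [f + s * 2]) := by
  have hne1 : orig ≠ [] ∨ mixes ≠ [] := by
    rcases orig with _ | ⟨o, os⟩
    · right; intro hc; rw [hc] at hlen; simp at hlen
    · left; simp
  have hm1 := pvPopMin_merge orig mixes hne1
  rw [hp1] at hm1
  simp only at hm1
  have hlenm : (pvMerge orig mixes).length = orig.length + mixes.length := by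
    rw [(pvMerge_perm orig mixes).length_eq, List.length_append]
  have hne2 : o1 ≠ [] ∨ m1 ≠ [] := by
    by_contra hc
    rcases not_or.mp hc with ⟨h1, h2⟩
    rw [not_not] at h1 h2
    rw [h1, h2] at hm1
    have : (pvMerge orig mixes).length = 1 := by rw [hm1]; simp [pvMerge]
    omega
  have hm2 := pvPopMin_merge o1 m1 hne2
  rw [hp2] at hm2
  simp only at hm2
  rw [hm2] at hm1
  -- sortedness of the merged view
  have hms : (pvMerge orig mixes).Pairwise (· ≤ ·) := pvMerge_sorted orig mixes hso hsm
  rw [hm1] at hms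
  have hfs : f ≤ s := (List.pairwise_cons.mp hms).1 s (List.mem_cons_self)
  have hrest : ∀ x ∈ pvMerge o2 m2, s ≤ x :=
    (List.pairwise_cons.mp (List.pairwise_cons.mp hms).2).1
  have hrest' : ∀ x, x ∈ o2 ∨ x ∈ m2 → s ≤ x := by
    intro x hx
    refine hrest x ?_
    exact (pvMerge_perm o2 m2).mem_iff.mpr (List.mem_append.mpr hx)
  -- structure of the two pops
  have hc1 := pvPopMin_cases orig mixes hne1
  rw [hp1] at hc1
  have hc2 := pvPopMin_cases o1 m1 hne2
  rw [hp2] at hc2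
  simp only at hc1 hc2
  -- o2 is orig, or a tail of it (possibly twice); m2 likewise a suffix of mixes
  have ho1 : o1 = orig ∨ o1 = orig.tail := by
    rcases hc1 with ⟨_, h, _⟩ | ⟨_, _, h, _⟩
    · right; exact h
    · left; exact h
  have ho2 : o2 = o1 ∨ o2 = o1.tail := by
    rcases hc2 with ⟨_, h, _⟩ | ⟨_, _, h, _⟩
    · right; exact h
    · left; exact h
  have hM1 : m1 = mixes ∨ m1 = mixes.tail := by
    rcases hc1 with ⟨_, _, h⟩ | ⟨_, _, _, h⟩
    · left; exact h
    · right; exact h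
  have hM2 : m2 = m1 ∨ m2 = m1.tail := by
    rcases hc2 with ⟨_, _, h⟩ | ⟨_, _, _, h⟩
    · left; exact h
    · right; exact h
  have hso2 : o2.Pairwise (· ≤ ·) := by
    have h1 : o1.Pairwise (· ≤ ·) := by
      rcases ho1 with rfl | rfl
      · exact hso
      · exact pvPairwise_tail hso
    rcases ho2 with rfl | rfl
    · exact h1
    · exact pvPairwise_tail h1
  have hsm1 : m1.Pairwise (· ≤ ·) := by
    rcases hM1 with rfl | rfl
    · exact hsm
    · exact pvPairwise_tail hsm
  have hsm2 : m2.Pairwise (· ≤ ·) := by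
    rcases hM2 with rfl | rfl
    · exact hsm1
    · exact pvPairwise_tail hsm1
  -- every live old mix is ≤ the new mix
  have hmixle : ∀ m ∈ m2, m ≤ f + s * 2 := by
    intro m hm
    have hm2ne : m2 ≠ [] := by intro hc; rw [hc] at hm; simp at hm
    have hm1ne : m1 ≠ [] := by
      rcases hM2 with rfl | rfl
      · exact hm2ne
      · intro hc; rw [hc] at hm2ne; simp at hm2ne
    have hmne : mixes ≠ [] := by
      rcases hM1 with rfl | rfl
      · exact hm1ne
      · intro hc; rw [hc] at hm1ne; simp at hm1ne
    rcases hinv with hc | ⟨b, hbo, hbd, hbl⟩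
    · exact absurd hc hmne
    -- last live mix value is the last of mixes
    have hlast2 : m2.getLastD 0 = mixes.getLastD 0 := by
      have e1 : m1.getLastD 0 = mixes.getLastD 0 := by
        rcases hM1 with rfl | rfl
        · rfl
        · exact pvGetLastD_tail mixes hm1ne
      rcases hM2 with rfl | rfl
      · exact e1
      · rw [pvGetLastD_tail m1 hm2ne]; exact e1
    have hmle : m ≤ mixes.getLastD 0 := by
      rw [← hlast2]
      exact pvLe_getLastD hsm2 m hm
    -- b ≤ f
    have hbf : b ≤ f := by
      rcases hc1 with ⟨hmem, _, _⟩ | ⟨_, hfh, _, hm1t⟩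
      · exact hbo f hmem
      · -- f is the head of mixes, whose tail m1 is still nonempty → head ∈ dropLast
        rw [hfh]
        refine hbd _ (pvHeadD_mem_dropLast mixes ?_)
        rw [← hm1t]
        exact hm1ne
    -- b ≤ s
    have hbs : b ≤ s := by
      rcases hc2 with ⟨hmem, _, _⟩ | ⟨_, hsh, _, hm2t⟩
      · -- s ∈ o1 ⊆ orig
        have : s ∈ orig := by
          rcases ho1 with rfl | rfl
          · exact hmem
          · exact List.mem_of_mem_tail hmem
        exact hbo s this
      · -- s is the head of m1, whose tail m2 is still nonempty
        rw [hsh]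
        have hhead : m1.headD 0 ∈ m1.dropLast := by
          refine pvHeadD_mem_dropLast m1 ?_
          rw [← hm2t]; exact hm2ne
        rcases hM1 with rfl | rfl
        · exact hbd _ hhead
        · exact hbd _ (pvMem_dropLast_tail mixes hhead)
    omega
  have hsmix : (m2 ++ [f + s * 2]).Pairwise (· ≤ ·) := by
    rw [List.pairwise_append]
    refine ⟨hsm2, by simp, ?_⟩
    intro a ha b hb
    rcases List.mem_singleton.mp hb with rfl
    exact hmixle a ha
  refine ⟨hm1, hso2, hsmix, ?_⟩
  -- invariant for the new state, witness b := s
  right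
  refine ⟨s, ?_, ?_, ?_⟩
  · intro x hx
    exact hrest' x (Or.inl hx)
  · intro m hm
    rw [List.dropLast_concat] at hm
    exact hrest' m (Or.inr hm)
  · rw [pvGetLastD_concat]
    omega

-- the main simulation: heap contents ~ merged two-queue view ⇒ both loops return the same value
theorem pvLoop_eq : ∀ (fuel : Nat) (h orig mixes : List Int) (K ans : Int),
    pvIsHeap h → orig.Pairwise (· ≤ ·) → mixes.Pairwise (· ≤ ·) → pvInv orig mixes →
    h.Perm (pvMerge orig mixes) → h ≠ [] → (h.length = 1 → K ≤ h.getD 0 0) →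
    h.length ≤ fuel → solutionLoop h K ans fuel = solutionAltLoop orig mixes K ans fuel := by
  intro fuel
  induction fuel with
  | zero =>
    intro h orig mixes K ans _ _ _ _ _ hne hk1 hlen
    have : h.length ≠ 0 := by
      intro hc; exact hne (List.length_eq_zero_iff.mp hc)
    omega
  | succ fuel IH =>
    intro h orig mixes K ans hheap hso hsm hinv hperm hne h1K hlen
    obtain ⟨a, h', rfl⟩ : ∃ a h', h = a :: h' := by
      cases h with
      | nil => exact absurd rfl hne
      | cons a h' => exact ⟨a, h', rfl⟩
    have hne1 : orig ≠ [] ∨ mixes ≠ [] := by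
      by_contra hc
      rcases not_or.mp hc with ⟨h1, h2⟩
      rw [not_not] at h1 h2
      subst h1; subst h2
      rw [show pvMerge [] [] = [] by simp [pvMerge]] at hperm
      simp at hperm
    have hEmpF : (orig.isEmpty && mixes.isEmpty) = false := by
      rcases hne1 with h1 | h1 <;> cases orig <;> cases mixes <;> simp_all
    have hmsort : (pvMerge orig mixes).Pairwise (· ≤ ·) := pvMerge_sorted orig mixes hso hsm
    -- the B-side current minimum equals the heap root
    have hcur : pvCur orig mixes = a := by
      have h1 : (a :: h').getD 0 0 = (pvMerge orig mixes).getD 0 0 :=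
        pvHead_eq _ _ hheap hmsort hperm (by simp)
      rw [pvPopMin_merge orig mixes hne1] at h1
      rw [pvCur_popMin orig mixes hne1]
      simpa using h1.symm
    simp only [solutionLoop, solutionAltLoop, hEmpF, Bool.false_eq_true, if_false, hcur]
    by_cases hK : a < K
    · rw [if_pos hK, if_pos hK]
      -- heap has ≥ 2 elements, else h1K forbids a < K
      have hlen2 : 2 ≤ (a :: h').length := by
        cases h' with
        | nil =>
          have := h1K (by simp)
          simp at this
          omega
        | cons c h'' => simp
      have hlenm : (pvMerge orig mixes).length = orig.length + mixes.length := by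
        rw [(pvMerge_perm orig mixes).length_eq, List.length_append]
      have hlenq : 2 ≤ orig.length + mixes.length := by
        rw [← hlenm, ← hperm.length_eq]
        exact hlen2
      rw [if_neg (by omega)]
      -- the two pops, named
      obtain ⟨f, o1, m1, hp1⟩ : ∃ f o1 m1, pvPopMin orig mixes = (f, o1, m1) :=
        ⟨_, _, _, rfl⟩
      obtain ⟨s, o2, m2, hp2⟩ : ∃ s o2 m2, pvPopMin o1 m1 = (s, o2, m2) :=
        ⟨_, _, _, rfl⟩
      obtain ⟨hdec, hso2, hsmix, hinv2⟩ :=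
        pvStep orig mixes o1 m1 o2 m2 f s hp1 hp2 hso hsm hinv hlenq
      -- f is the root a
      have hfa : f = a := by
        have h1 : (a :: h').getD 0 0 = (pvMerge orig mixes).getD 0 0 :=
          pvHead_eq _ _ hheap hmsort hperm (by simp)
        rw [hdec] at h1
        simpa using h1.symm
      rw [hfa] at hdec
      -- A side: first pop
      obtain ⟨h1, hpop1, hh1, hp1A, hl1⟩ := pyHeappop_spec (a :: h') hheap (by simp)
      simp only [List.getD_cons_zero] at hpop1 hp1A
      have hp1' : h1.Perm (s :: pvMerge o2 m2) := by
        have h2x := (hp1A.trans hperm)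
        rw [hdec] at h2x
        exact h2x.cons_inv
      -- A side: second pop
      have hh1ne : h1 ≠ [] := by
        intro hc
        rw [hc] at hl1
        simp only [List.length_nil, List.length_cons] at hl1 hlen2
        omega
      obtain ⟨h2, hpop2, hh2, hp2A, hl2⟩ := pyHeappop_spec h1 hh1 hh1ne
      have hsort1 : (s :: pvMerge o2 m2).Pairwise (· ≤ ·) := by
        have := hmsort
        rw [hdec] at this
        exact (List.pairwise_cons.mp this).2
      have hsecond : h1.getD 0 0 = s := by
        have := pvHead_eq h1 (s :: pvMerge o2 m2) hh1 hsort1 hp1' hh1ne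
        simpa using this
      rw [hsecond] at hpop2 hp2A
      simp only [hpop1, hpop2]
      have hp2' : h2.Perm (pvMerge o2 m2) := (hp2A.trans hp1').cons_inv
      -- the push and the append agree up to permutation
      obtain ⟨hlen3, hperm3, hheap3⟩ := pyHeappush_spec h2 (a + s * 2) hh2
      have hpermNew : (pyHeappush h2 (a + s * 2)).Perm (pvMerge o2 (m2 ++ [a + s * 2])) := by
        have hX : (pvMerge o2 (m2 ++ [a + s * 2])).Perm ((a + s * 2) :: pvMerge o2 m2) := by
          refine (pvMerge_perm o2 (m2 ++ [a + s * 2])).trans ?_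
          rw [(List.append_assoc o2 m2 [a + s * 2]).symm]
          exact (List.perm_append_singleton _ _).trans ((pvMerge_perm o2 m2).symm.cons _)
        exact hperm3.trans ((hp2'.cons _).trans hX.symm)
      rw [hfa] at hsmix hinv2
      have h3ne : pyHeappush h2 (a + s * 2) ≠ [] := by
        intro hc
        rw [hc] at hlen3
        simp at hlen3
      -- rewrite the B recursive call through the named pops
      have hBrec : solutionAltLoop (pvPopMin (pvPopMin orig mixes).2.1 (pvPopMin orig mixes).2.2).2.1
          ((pvPopMin (pvPopMin orig mixes).2.1 (pvPopMin orig mixes).2.2).2.2 ++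
            [(pvPopMin orig mixes).1 + (pvPopMin (pvPopMin orig mixes).2.1 (pvPopMin orig mixes).2.2).1 * 2])
          K (ans + 1) fuel = solutionAltLoop o2 (m2 ++ [a + s * 2]) K (ans + 1) fuel := by
        rw [hp1]
        simp only [hp2, hfa]
      by_cases hg3 : (pyHeappush h2 (a + s * 2)).length < 2 ∧
          (pyHeappush h2 (a + s * 2)).getD 0 0 < K
      · rw [if_pos hg3, hBrec]
        -- A returns -1 here; B hits the same single sub-K element on its next iteration
        have hx1 : (pyHeappush h2 (a + s * 2)).length = 1 := by omega
        have hmergelen : (pvMerge o2 (m2 ++ [a + s * 2])).length = 1 := by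
          rw [← hpermNew.length_eq]; exact hx1
        have ho2nil : o2 = [] ∧ m2 = [] := by
          have := (pvMerge_perm o2 (m2 ++ [a + s * 2])).length_eq
          rw [hmergelen] at this
          simp only [List.length_append, List.length_singleton] at this
          constructor
          · exact List.length_eq_zero_iff.mp (by omega)
          · exact List.length_eq_zero_iff.mp (by omega)
        obtain ⟨rfl, rfl⟩ := ho2nil
        have hmix : (pyHeappush h2 (a + s * 2)) = [a + s * 2] := by
          have hp : (pyHeappush h2 (a + s * 2)).Perm [a + s * 2] := by
            simpa [pvMerge] using hpermNew
          exact List.perm_singleton.mp hp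
        have hmK : a + s * 2 < K := by
          have := hg3.2
          rw [hmix] at this
          simpa using this
        obtain ⟨f', rfl⟩ : ∃ f', fuel = f' + 1 := ⟨fuel - 1, by omega⟩
        simp [solutionAltLoop, pvCur, hmK]
      · rw [if_neg hg3, hBrec]
        refine IH (pyHeappush h2 (a + s * 2)) o2 (m2 ++ [a + s * 2]) K (ans + 1)
          hheap3 hso2 hsmix hinv2 hpermNew h3ne ?_ (by omega)
        intro hx1
        rcases not_and_or.mp hg3 with hc | hc
        · omega
        · omega
    · rw [if_neg hK, if_neg hK]

-- ===== VERDICT =====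
theorem solution_spec : Claim_equal_solution := by
  intro scoville K _hdom hpre
  show solution scoville K = solution_alt scoville K
  simp only [solution, solution_alt]
  obtain ⟨HL, HP, HH⟩ := pyHeapify_spec scoville
  refine pvLoop_eq scoville.length (pyHeapify scoville)
    (PySem.List.sorted scoville (fun x => x)) [] K 0 HH ?_ ?_ ?_ ?_ ?_ ?_ (by omega)
  · exact PySem.List.sorted_pairwise scoville (fun x => x)
  · simp
  · left; rfl
  · rw [pvMerge_nil_right]
    exact HP.trans (PySem.List.sorted_perm scoville (fun x => x) false).symm
  · intro hc
    rw [hc] at HL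
    simp at HL
    exact hpre.1 (List.length_eq_zero_iff.mp HL.symm)
  · intro h1
    rw [HL] at h1
    obtain ⟨x, rfl⟩ : ∃ x, scoville = [x] := by
      cases scoville with
      | nil => simp at h1
      | cons x t =>
        cases t with
        | nil => exact ⟨x, rfl⟩
        | cons y t => simp at h1
    have hfix : pyHeapify [x] = [x] := by simp [pyHeapify]
    rw [hfix]
    simpa using hpre.2 (by simp)
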